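-- pv_equiv track=rewrite | github.com/leiyiz/nlp_hw | a1/n_gram.py | grouptokens
-- ===== SOURCE A (Python) =====
-- UNK = '@@UNK@@'
--
-- def grouptokens(tokens, vocab, groupsize):
--     ans = []
--     for line in tokens:
--         line_group = []
--         for i in range(len(line) - groupsize + 1):
--             group = []
--             for j in range(groupsize):
--                 group.append(line[i + j] if line[i + j] in vocab else UNK)
--             line_group.append(tuple(group))
--         ans.append(line_group)
--     return ans
-- ===== SOURCE B (Python) =====
-- UNK = '@@UNK@@'
--
-- def grouptokens(tokens, vocab, groupsize):
--     ans = []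
--     for line in tokens:
--         replaced = [t if t in vocab else UNK for t in line]
--         ans.append([tuple(replaced[i:i + groupsize])
--                     for i in range(len(replaced) - groupsize + 1)])
--     return ans
-- ===== Notes on version B (the rewrite author's own statement) =====
-- stated objective: simpler
-- what changed: B does the UNK replacement once per line in a single pass and then windows the replaced list by slicing, instead of A's triple-nested loop that re-tests vocab membership inside every overlapping window.
-- outside the precondition, e.g. on grouptokens([['a', 'b']], {'a'}, -1): A returns [[(), (), (), ()]], B returns [[('a',), (), (), ()]]
import Mathlib
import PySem

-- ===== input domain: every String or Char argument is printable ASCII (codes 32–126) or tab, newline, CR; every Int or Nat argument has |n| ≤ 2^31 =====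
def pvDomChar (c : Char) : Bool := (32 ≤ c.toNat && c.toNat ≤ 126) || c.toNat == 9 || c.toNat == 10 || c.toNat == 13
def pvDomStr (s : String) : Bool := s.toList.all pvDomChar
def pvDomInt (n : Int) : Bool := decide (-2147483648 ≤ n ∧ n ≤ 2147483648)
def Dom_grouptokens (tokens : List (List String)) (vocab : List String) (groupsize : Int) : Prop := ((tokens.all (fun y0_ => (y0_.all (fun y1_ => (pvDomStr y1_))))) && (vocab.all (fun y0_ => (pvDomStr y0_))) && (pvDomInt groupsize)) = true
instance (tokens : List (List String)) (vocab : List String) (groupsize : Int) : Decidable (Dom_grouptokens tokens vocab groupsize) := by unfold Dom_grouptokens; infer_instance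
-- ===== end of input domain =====

-- B replaces out-of-vocab tokens once per line and windows the replaced list by slicing,
-- instead of A's triple-nested loop re-testing vocab inside every window (objective: simpler).

-- ===== PORT A =====
-- literal port of A: ans/line_group/group accumulators, ranges, per-element vocab test.
-- line[i + j] is ported as pyGetD with default "": inside the loops 0 ≤ i ≤ len-groupsize
-- and 0 ≤ j < groupsize, so the index is always in range and Python never raises.
def grouptokens (tokens : List (List String)) (vocab : List String) (groupsize : Int) : List (List (List String)) :=
  tokens.foldl (fun ans line =>
    let line_group :=
      (PySem.List.pyRange 0 ((line.length : Int) - groupsize + 1) 1).foldl (fun lg i =>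
        let group :=
          (PySem.List.pyRange 0 groupsize 1).foldl (fun g j =>
            g ++ [if vocab.contains (PySem.List.pyGetD line (i + j) "")
                  then PySem.List.pyGetD line (i + j) "" else "@@UNK@@"]) []
        lg ++ [group]) []
    ans ++ [line_group]) []

-- ===== PORT B =====
def grouptokens_alt (tokens : List (List String)) (vocab : List String) (groupsize : Int) : List (List (List String)) :=
  tokens.foldl (fun ans line =>
    let replaced := line.map (fun t => if vocab.contains t then t else "@@UNK@@")
    ans ++ [(PySem.List.pyRange 0 ((replaced.length : Int) - groupsize + 1) 1).map
              (fun i => PySem.List.slice replaced (some i) (some (i + groupsize)))]) []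

-- ===== PRECONDITION & SPEC =====
-- Pre_ excludes negative groupsize, which is outside the function's natural domain: A there
-- returns lists of len+1-groupsize empty tuples (an artifact of its empty inner range), while
-- B's Python slices wrap the negative stop.
def Pre_grouptokens (tokens : List (List String)) (vocab : List String) (groupsize : Int) : Prop :=
  0 ≤ groupsize
instance (tokens : List (List String)) (vocab : List String) (groupsize : Int) : Decidable (Pre_grouptokens tokens vocab groupsize) := by unfold Pre_grouptokens; infer_instance

def pvWitness_grouptokens : List (List String) × List String × Int :=
  ([["a", "b", "c"], [], ["x"]], ["a", "c"], 2)

def Spec_grouptokens (tokens : List (List String)) (vocab : List String) (groupsize : Int) (out : List (List (List String))) : Prop := out = grouptokens_alt tokens vocab groupsize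
instance (tokens : List (List String)) (vocab : List String) (groupsize : Int) (out : List (List (List String))) : Decidable (Spec_grouptokens tokens vocab groupsize out) := by unfold Spec_grouptokens; infer_instance

-- ===== CLAIM (what is proved, stated in full; the proofs are below) =====
def Claim_equal_grouptokens : Prop := ∀ (tokens : List (List String)) (vocab : List String) (groupsize : Int), Dom_grouptokens tokens vocab groupsize → Pre_grouptokens tokens vocab groupsize → Spec_grouptokens tokens vocab groupsize (grouptokens tokens vocab groupsize)

-- ===== LEMMAS AND PROOFS =====

-- the per-line group lists coincide for 0 ≤ groupsize
theorem perLine_eq (line : List String) (vocab : List String) (groupsize : Int)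
    (hg : 0 ≤ groupsize) :
    (PySem.List.pyRange 0 ((line.length : Int) - groupsize + 1) 1).foldl (fun lg i =>
        lg ++ [(PySem.List.pyRange 0 groupsize 1).foldl (fun g j =>
            g ++ [if vocab.contains (PySem.List.pyGetD line (i + j) "")
                  then PySem.List.pyGetD line (i + j) "" else "@@UNK@@"]) []]) []
      = (PySem.List.pyRange 0
            (((line.map (fun t => if vocab.contains t then t else "@@UNK@@")).length : Int)
              - groupsize + 1) 1).map
          (fun i => PySem.List.slice (line.map (fun t => if vocab.contains t then t else "@@UNK@@"))
                      (some i) (some (i + groupsize))) := by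
  rw [List.length_map]
  rw [PySem.List.foldl_append_singleton_eq_map, List.nil_append]
  apply List.map_congr_left
  intro i hi
  rw [PySem.List.mem_pyRange_one] at hi
  obtain ⟨hi0, hiU⟩ := hi
  -- name the pieces
  obtain ⟨a, rfl⟩ : ∃ a : Nat, i = (a : Int) := ⟨i.toNat, (Int.toNat_of_nonneg hi0).symm⟩
  obtain ⟨gn, rfl⟩ : ∃ g : Nat, groupsize = (g : Int) := ⟨groupsize.toNat, (Int.toNat_of_nonneg hg).symm⟩
  have hbound : a + gn ≤ line.length := by omega
  rw [PySem.List.foldl_append_singleton_eq_map, List.nil_append]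
  rw [show ((a : Int) + (gn : Int)) = ((a : Int) + (gn : Int)) from rfl,
      PySem.List.slice_natCast_add]
  rw [PySem.List.pyRange_one ((0 : Int)) (gn : Int)]
  simp only [Int.sub_zero, Int.toNat_natCast, List.map_map]
  apply List.ext_getElem
  · simp only [List.length_map, List.length_range, List.length_take, List.length_drop]
    omega
  · intro k hk1 hk2
    have hklen : k < gn := by simpa using hk1
    have hidx : a + k < line.length := by omega
    simp only [List.getElem_map, List.getElem_range, Function.comp_apply,
               List.getElem_take, List.getElem_drop]
    have hget : PySem.List.pyGetD line ((a : Int) + ((0 : Int) + (k : Int))) ""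
        = GetElem.getElem line (a + k) hidx := by
      rw [PySem.List.pyGetD_eq_getElem line "" (by omega) (by omega)]
      simp only [show ((a : Int) + ((0 : Int) + (k : Int))).toNat = a + k by omega]
    rw [hget]

-- ===== VERDICT (by name: the statement is the Claim_ definition above) =====
theorem grouptokens_spec : Claim_equal_grouptokens := by
  intro tokens vocab groupsize _ hpre
  unfold Spec_grouptokens grouptokens grouptokens_alt
  rw [PySem.List.foldl_append_singleton_eq_map, PySem.List.foldl_append_singleton_eq_map,
      List.nil_append, List.nil_append]
  apply List.map_congr_left
  intro line _
  exact perLine_eq line vocab groupsize hpre
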